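/- GENERATED by farm/mkstatement.py from design/units.tsv (unit `mem_read`) and the Specs of Gif/Spec/*.lean — do not edit.
   THE STATEMENT of the proof unit `mem_read`: the function `mem_read` (44 instructions) satisfies its contract,
   given the contracts of its callees. What the names mean: ProgX/Base/Spec/Basic.lean. The theorem to prove:
   `theorem mem_read_ok : Gif.Spec.mem_read.Statement`. -/
import Gif.Code
import Gif.Dec.All
import Gif.Labels
import Gif.Spec.Reader
import ProgX.Base.Spec.Libc
namespace Gif.Spec.mem_read
open X86 X86.User Asan

/-- The statement of unit `mem_read`. -/
def Statement : Prop :=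
  ∀ (Lay : Layout) (_hLay : Lay.hi = 0x1000000) (μ : Microarch) (_hμ : UserX.MicroOK μ) (u₀ : State)
    (_hcode : HasCodeNat Lay u₀ Gif.L.mem_read.entry Gif.Code.code_mem_read.nat Gif.L.mem_read.size)
    (_h_memcpy : ∀ (others : List Obj) (frames : List (Nat × FrameLayout)), Calls Lay μ ProgX.Base.WayInv (ProgX.Base.conv u₀) ProgX.Base.L.memcpy.entry (ProgX.Base.Spec.memcpy.spec others frames))
    (_h_asan_load8_noabort : Asan.SmallCheck Lay μ ProgX.Base.WayInv (ProgX.Base.CodeOK u₀) [.rax, .rcx, .rdx] 8 ProgX.Base.L.__asan_load8_noabort.entry),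
    ∀ (H : Heap) (rest : List Obj) (frames : List (Nat × FrameLayout)) (F : Forest) (R : Rd) (n : Nat), Calls Lay μ ProgX.Base.WayInv (ProgX.Base.conv u₀) Gif.L.mem_read.entry (Gif.Spec.mem_read.spec H rest frames F R n)

end Gif.Spec.mem_read
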